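-- pv_equiv track=rewrite | github.com/matthiaslein/AoC2022 | day-01/01-code.py | create_list_of_elves
-- ===== SOURCE A (Python) =====
-- def create_list_of_elves(list) -> list:
--     list_of_elves = []
--     list_of_snacks = []
--     for item in list:
--         if item != []:
--             list_of_snacks.append(item)
--         else:
--             list_of_elves.append(list_of_snacks)
--             list_of_snacks = []
--     return list_of_elves
-- ===== SOURCE B (Python) =====
-- def create_list_of_elves(list) -> list:
--     result = []
--     start = 0
--     for i, item in enumerate(list):
--         if item == []:
--             result.append(list[start:i])
--             start = i + 1
--     return result
-- ===== Notes on version B (the rewrite author's own statement) =====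
-- stated objective: alternative
-- what changed: Replaces the running accumulator sublist with index-based slicing: enumerate the list, remember the start index of the current group, and on each empty delimiter append the slice list[start:i] instead of a sublist grown item by item.
import Mathlib
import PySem

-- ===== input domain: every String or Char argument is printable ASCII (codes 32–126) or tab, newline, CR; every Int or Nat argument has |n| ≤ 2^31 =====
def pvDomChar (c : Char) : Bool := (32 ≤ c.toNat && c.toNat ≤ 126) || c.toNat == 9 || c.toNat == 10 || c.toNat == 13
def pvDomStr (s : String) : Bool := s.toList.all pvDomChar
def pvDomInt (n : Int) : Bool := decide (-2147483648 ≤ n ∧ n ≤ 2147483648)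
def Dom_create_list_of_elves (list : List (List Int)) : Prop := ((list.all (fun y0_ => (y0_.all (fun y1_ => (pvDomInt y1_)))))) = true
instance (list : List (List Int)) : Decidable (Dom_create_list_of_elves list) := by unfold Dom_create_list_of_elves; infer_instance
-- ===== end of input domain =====

-- B replaces A's running accumulator sublist by index-based slicing over enumerate (alternative decomposition, same cost).

-- ===== PORT A =====
-- A's loop state: (list_of_elves, list_of_snacks)
def elvesStepA (s : List (List (List Int)) × List (List Int)) (item : List Int) :
    List (List (List Int)) × List (List Int) :=
  if item ≠ [] then (s.1, s.2 ++ [item]) else (s.1 ++ [s.2], [])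

def create_list_of_elves (list : List (List Int)) : List (List (List Int)) :=
  (list.foldl elvesStepA ([], [])).1

-- ===== PORT B =====
-- B's loop state: (result, start); each delimiter appends list[start:i]
def elvesStepB (list : List (List Int)) (s : List (List (List Int)) × Int)
    (p : Int × List Int) : List (List (List Int)) × Int :=
  if p.2 = [] then (s.1 ++ [PySem.List.slice list (some s.2) (some p.1)], p.1 + 1) else s

def create_list_of_elves_alt (list : List (List Int)) : List (List (List Int)) :=
  ((PySem.List.enumerate list 0).foldl (elvesStepB list) ([], 0)).1

-- ===== PRECONDITION & SPEC =====
def Spec_create_list_of_elves (list : List (List Int)) (out : List (List (List Int))) : Prop := out = create_list_of_elves_alt list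
instance (list : List (List Int)) (out : List (List (List Int))) : Decidable (Spec_create_list_of_elves list out) := by unfold Spec_create_list_of_elves; infer_instance

-- ===== CLAIM (what is proved, stated in full; the proofs are below) =====
def Claim_equal_create_list_of_elves : Prop := ∀ (list : List (List Int)), Dom_create_list_of_elves list → Spec_create_list_of_elves list (create_list_of_elves list)

-- ===== LEMMAS AND PROOFS =====

lemma slice_self (L : List (List Int)) (a : Int) (ha : 0 ≤ a) :
    PySem.List.slice L (some a) (some a) = [] := by
  rw [PySem.List.slice_toNat L ha ha]; simp

lemma slice_snoc (L : List (List Int)) (start k : Nat) (hsk : start ≤ k) (hk : k < L.length) :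
    PySem.List.slice L (some (start:Int)) (some ((k:Int)+1))
      = PySem.List.slice L (some (start:Int)) (some (k:Int)) ++ [L[k]] := by
  have h1 : ((k:Int)+1) = (((k+1:Nat)):Int) := by push_cast; ring
  rw [h1, PySem.List.slice_natCast, PySem.List.slice_natCast]
  have h2 : k + 1 - start = (k - start) + 1 := by omega
  rw [h2, List.take_add_one]
  have h3 : (L.drop start)[k - start]? = some L[k] := by
    rw [List.getElem?_drop]
    have : start + (k - start) = k := by omega
    rw [this, List.getElem?_eq_getElem hk]
  simp [h3]

lemma elves_key (suffix : List (List Int)) :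
    ∀ (L : List (List Int)) (acc : List (List (List Int))) (start k : Nat),
      L.drop k = suffix → start ≤ k →
      ((PySem.List.enumerate suffix (k:Int)).foldl (elvesStepB L) (acc, (start:Int))).1
        = (suffix.foldl elvesStepA (acc, PySem.List.slice L (some (start:Int)) (some (k:Int)))).1 := by
  induction suffix with
  | nil => intro L acc start k _ _; simp [PySem.List.enumerate]
  | cons x xs ih =>
    intro L acc start k hdrop hsk
    have hk : k < L.length := by
      by_contra h
      rw [List.drop_eq_nil_of_le (by omega)] at hdrop
      exact (List.cons_ne_nil x xs) hdrop.symm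
    have hx : L[k] = x := by
      have h0 : L[k]? = some x := by
        have h := congrArg (fun (l : List (List Int)) => l[0]?) hdrop
        simpa [List.getElem?_drop] using h
      rw [List.getElem?_eq_getElem hk] at h0
      exact Option.some.inj h0
    have hdrop' : L.drop (k+1) = xs := by
      have h0 : (L.drop k).drop 1 = xs := by rw [hdrop]; rfl
      rw [List.drop_drop] at h0
      exact h0
    rw [PySem.List.enumerate_cons]
    by_cases hxe : x = ([] : List Int)
    · -- delimiter: B appends the slice, A appends the snacks and resets
      simp only [List.foldl_cons, elvesStepB, elvesStepA, hxe, ite_not, if_true]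
      have h1 : ((k:Int)+1) = (((k+1:Nat)):Int) := by push_cast; ring
      rw [h1, ih L (acc ++ [PySem.List.slice L (some (start:Int)) (some (k:Int))]) (k+1) (k+1) hdrop' (le_refl _)]
      rw [← h1, slice_self L ((k:Int)+1) (by positivity)]
    · -- ordinary item: B keeps state, A extends the snacks
      simp only [List.foldl_cons, elvesStepB, elvesStepA, ite_not, if_neg hxe]
      have h1 : ((k:Int)+1) = (((k+1:Nat)):Int) := by push_cast; ring
      rw [h1, ih L acc start (k+1) hdrop' (by omega)]
      rw [← h1, slice_snoc L start k hsk hk, hx]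

-- ===== VERDICT (by name: the statement is the Claim_ definition above) =====
theorem create_list_of_elves_spec : Claim_equal_create_list_of_elves := by
  intro list _
  unfold Spec_create_list_of_elves create_list_of_elves create_list_of_elves_alt
  have := elves_key list list [] 0 0 (by simp) (le_refl 0)
  simp only [Int.natCast_zero] at this
  rw [this]
  simp [PySem.List.slice_to]
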